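-- pv_equiv track=rewrite | github.com/miliar/Code_Jam_Webscraper | solutions_python/solutions_year17_round1_nr1/473.py | replace_line
-- ===== SOURCE A (Python) =====
-- def replace_line(cake_row):
--     result = ""
--     num_times = 1
--     current_element = "?"
--     for element in cake_row:
--         if element == "?" and current_element == "?":
--             num_times += 1
--         elif element == "?":
--             result += current_element
--         else:
--             result += element * num_times
--             current_element = element
--             num_times = 1
--     return result
-- ===== SOURCE B (Python) =====
-- def replace_line(cake_row):
--     first = next((c for c in cake_row if c != "?"), None)
--     if first is None:
--         return ""
--     last = first
--     out = []
--     for c in cake_row: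
--         if c == "?":
--             out.append(last)
--         else:
--             last = c
--             out.append(c)
--     return "".join(out)
-- ===== Notes on version B (the rewrite author's own statement) =====
-- stated objective: simpler
-- what changed: Replaces A's three-state loop (pending run counter, current element, repeated string concatenation with char*count) by a two-phase plan: find the first real character up front (empty result if the row has none), then one uniform pass appending last-or-current char into a list joined at the end.
import Mathlib
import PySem

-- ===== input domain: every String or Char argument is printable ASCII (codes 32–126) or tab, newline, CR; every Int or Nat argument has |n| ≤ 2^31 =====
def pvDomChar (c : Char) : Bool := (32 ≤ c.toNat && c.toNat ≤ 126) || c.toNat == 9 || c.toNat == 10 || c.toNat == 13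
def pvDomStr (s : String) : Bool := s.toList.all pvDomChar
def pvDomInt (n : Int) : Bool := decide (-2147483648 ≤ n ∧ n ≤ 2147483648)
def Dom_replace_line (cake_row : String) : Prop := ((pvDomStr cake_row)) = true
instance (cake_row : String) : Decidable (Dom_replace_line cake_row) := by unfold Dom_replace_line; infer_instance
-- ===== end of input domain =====

-- B replaces A's pending-'?'-counter/current-element state machine by find-first-non-'?' then one uniform propagate pass (objective: simpler).
-- ===== PORT A =====
-- state: (result, num_times, current_element); num_times is Python int -> Int (always ≥ 1, so .toNat is exact for '* num_times')
def replaceLineStepA (s : List Char × Int × Char) (element : Char) : List Char × Int × Char :=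
  if element == '?' && s.2.2 == '?' then (s.1, s.2.1 + 1, s.2.2)
  else if element == '?' then (s.1 ++ [s.2.2], s.2.1, s.2.2)
  else (s.1 ++ List.replicate s.2.1.toNat element, 1, element)

def replace_line (cake_row : String) : String :=
  String.mk (cake_row.toList.foldl replaceLineStepA ([], 1, '?')).1

-- ===== PORT B =====
-- state: (last, out)
def replaceLineStepB (s : Char × List Char) (c : Char) : Char × List Char :=
  if c == '?' then (s.1, s.2 ++ [s.1]) else (c, s.2 ++ [c])

def replace_line_alt (cake_row : String) : String :=
  match cake_row.toList.find? (fun c => c != '?') with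
  | none => ""
  | some first => String.mk (cake_row.toList.foldl replaceLineStepB (first, [])).2

-- ===== PRECONDITION & SPEC =====
def Spec_replace_line (cake_row : String) (out : String) : Prop := out = replace_line_alt cake_row
instance (cake_row : String) (out : String) : Decidable (Spec_replace_line cake_row out) := by unfold Spec_replace_line; infer_instance

-- ===== CLAIM (what is proved, stated in full; the proofs are below) =====
def Claim_equal_replace_line : Prop := ∀ (cake_row : String), Dom_replace_line cake_row → Spec_replace_line cake_row (replace_line cake_row)

-- ===== LEMMAS AND PROOFS =====

-- ===== VERDICT (by name: the statement is the Claim_ definition above) =====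
-- B's fold result accumulator splits off
theorem stepB_acc (t : List Char) : ∀ (cur : Char) (r : List Char),
    (t.foldl replaceLineStepB (cur, r)).2 = r ++ (t.foldl replaceLineStepB (cur, [])).2 := by
  induction t with
  | nil => intro cur r; simp
  | cons e t ih =>
    intro cur r
    by_cases h : e = '?'
    · simp [replaceLineStepB, h, ih cur (r ++ [cur]), ih cur [cur]]
    · simp [replaceLineStepB, h, ih e (r ++ [e]), ih e [e]]

-- phase 2: once current_element is a real char, A's loop (num_times = 1) is B's propagate pass
theorem phase2 (t : List Char) : ∀ (res : List Char) (cur : Char), cur ≠ '?' →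
    (t.foldl replaceLineStepA (res, 1, cur)).1 = (t.foldl replaceLineStepB (cur, res)).2 := by
  induction t with
  | nil => intro res cur _; simp
  | cons e t ih =>
    intro res cur hcur
    by_cases h : e = '?'
    · simp [replaceLineStepA, replaceLineStepB, h, hcur, ih (res ++ [cur]) cur hcur]
    · simp [replaceLineStepA, replaceLineStepB, h, ih (res ++ [e]) e h]

theorem key (l : List Char) : ∀ (k : ℕ),
    (l.foldl replaceLineStepA ([], (k : Int) + 1, '?')).1 =
      match l.find? (fun c => c != '?') with
      | none => []
      | some c => List.replicate k c ++ (l.foldl replaceLineStepB (c, [])).2 := by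
  induction l with
  | nil => intro k; simp
  | cons e t ih =>
    intro k
    by_cases h : e = '?'
    · have : ((k : Int) + 1) + 1 = ((k + 1 : ℕ) : Int) + 1 := by push_cast; ring
      simp only [List.foldl_cons, replaceLineStepA, h, beq_self_eq_true, Bool.and_self, if_true, this]
      rw [ih (k + 1)]
      cases hf : t.find? (fun c => c != '?') with
      | none => simp [List.find?, hf]
      | some c =>
        simp only [List.find?, bne_self_eq_false, hf]
        rw [show replaceLineStepB (c, []) '?' = (c, [c]) from rfl,
          stepB_acc t c [c], List.replicate_succ', List.append_assoc]
    · have h1 : ((k : Int) + 1).toNat = k + 1 := by omega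
      have hb : (e == '?') = false := by simp [h]
      simp only [List.foldl_cons, replaceLineStepA, hb, Bool.false_and, Bool.false_eq_true,
        if_false, h1, List.nil_append]
      rw [phase2 t _ e h]
      simp only [List.find?, show (e != '?') = true from by simp [h]]
      simp only [replaceLineStepB, hb, Bool.false_eq_true, if_false]
      rw [List.nil_append, stepB_acc t e [e], stepB_acc t e (List.replicate (k + 1) e),
        List.replicate_succ', List.append_assoc]

-- ===== VERDICT (by name: the statement is the Claim_ definition above) =====
theorem replace_line_spec : Claim_equal_replace_line := by
  intro s _
  unfold Spec_replace_line replace_line replace_line_alt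
  have := key s.toList 0
  simp only [Nat.cast_zero, zero_add] at this
  rw [this]
  cases hf : s.toList.find? (fun c => c != '?') with
  | none => rfl
  | some c => simp
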